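-- pv_equiv track=rewrite | github.com/kghees/Coding-Test | 백준/Silver/3085. 사탕 게임/사탕 게임.py | check
-- ===== SOURCE A (Python) =====
-- def check(a):
--   x = len(a)
--   t = 1
--   for i in range(x):
--     cnt = 1
--     for j in range(1, x):
--       if a[i][j] == a[i][j-1]:
--         cnt += 1
--       else:
--         cnt = 1
--       if t < cnt:
--         t = cnt
--     cnt = 1
--     for j in range(1, x):
--       if a[j][i] == a[j-1][i]:
--         cnt += 1
--       else:
--         cnt = 1
--       if t < cnt:
--         t = cnt
--   return t
-- ===== SOURCE B (Python) =====
-- def max_run(seq):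
--     # longest run of equal adjacent values, via run-boundary ("cut") positions
--     n = len(seq)
--     if n == 0:
--         return 0
--     cuts = [k for k in range(1, n) if seq[k] != seq[k - 1]]
--     bounds = [0] + cuts + [n]
--     return max(e - s for s, e in zip(bounds, bounds[1:]))
--
-- def check(a):
--     x = len(a)
--     t = 1
--     for i in range(x):
--         t = max(t, max_run([a[i][j] for j in range(x)]),
--                 max_run([a[j][i] for j in range(x)]))
--     return t
-- ===== Notes on version B (the rewrite author's own statement) =====
-- stated objective: alternative
-- what changed: Replaces A's inline running-counter/running-max state machine over rows and columns by a max_run helper that lists the run-boundary positions of a 1-D sequence and returns the largest gap between consecutive boundaries, applied to each row and each extracted column.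
-- outside the precondition, e.g. on check([[]]): A returns 1, B raises IndexError
import Mathlib
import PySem

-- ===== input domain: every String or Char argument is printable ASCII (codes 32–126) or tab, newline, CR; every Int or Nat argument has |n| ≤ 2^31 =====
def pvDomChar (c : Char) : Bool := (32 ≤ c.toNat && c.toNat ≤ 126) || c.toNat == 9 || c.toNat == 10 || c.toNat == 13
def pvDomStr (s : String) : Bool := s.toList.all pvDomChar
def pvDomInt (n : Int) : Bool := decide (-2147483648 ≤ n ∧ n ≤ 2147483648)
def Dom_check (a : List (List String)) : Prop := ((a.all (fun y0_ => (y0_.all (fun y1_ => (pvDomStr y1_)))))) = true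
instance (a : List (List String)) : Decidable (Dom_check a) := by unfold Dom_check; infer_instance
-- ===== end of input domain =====

-- B replaces A's inline running-counter/running-max scan by a max_run helper computing, for each
-- row and each extracted column, the largest gap between consecutive run-boundary positions.


-- ===== PORT A =====
-- one inner 'for j in range(1, x)' loop of A, over the line 'g' (row i or column i), state (cnt, t)
def innerLoopA (g : Int → String) (x : Nat) (t : Int) : Int :=
  ((PySem.List.pyRange 1 (x : Int) 1).foldl
    (fun (p : Int × Int) j =>
      let cnt : Int := if g j = g (j - 1) then p.1 + 1 else 1
      (cnt, if p.2 < cnt then cnt else p.2)) (1, t)).2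

def check (a : List (List String)) : Int :=
  let x := a.length
  (PySem.List.pyRange 0 (x : Int) 1).foldl
    (fun t i =>
      let t1 := innerLoopA (fun j => PySem.List.pyGetD (PySem.List.pyGetD a i []) j "") x t
      innerLoopA (fun j => PySem.List.pyGetD (PySem.List.pyGetD a j []) i "") x t1) 1

-- ===== PORT B =====
-- Source B's max_run: run-boundary positions, then the largest gap between consecutive boundaries
def maxRunB (seq : List String) : Int :=
  let n := seq.length
  if n = 0 then 0 else
  let cuts : List Int := (PySem.List.pyRange 1 (n : Int) 1).filter
      (fun k => decide (PySem.List.pyGetD seq k "" ≠ PySem.List.pyGetD seq (k - 1) ""))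
  let bounds : List Int := 0 :: (cuts ++ [(n : Int)])
  -- python's bare max(...) raises on an empty iterable; bounds always has ≥ 2 elements, so the
  -- generator is never empty and the .getD default is unreachable
  (PySem.List.max? ((bounds.zip bounds.tail).map (fun q => q.2 - q.1)) (fun y => y)).getD 0

def check_alt (a : List (List String)) : Int :=
  let x := a.length
  (PySem.List.pyRange 0 (x : Int) 1).foldl
    (fun t i =>
      let row := (PySem.List.pyRange 0 (x : Int) 1).map
          (fun j => PySem.List.pyGetD (PySem.List.pyGetD a i []) j "")
      let col := (PySem.List.pyRange 0 (x : Int) 1).map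
          (fun j => PySem.List.pyGetD (PySem.List.pyGetD a j []) i "")
      max (max t (maxRunB row)) (maxRunB col)) 1

-- ===== PRECONDITION & SPEC =====
-- Pre_ excludes ragged grids whose rows are shorter than the number of rows: there A's Python
-- raises IndexError on every such grid except the degenerate grid whose only row is empty, where
-- A returns 1 only because its loops never touch the row while B's max_run must read it (cited).
def Pre_check (a : List (List String)) : Prop := ∀ r ∈ a, a.length ≤ r.length
instance (a : List (List String)) : Decidable (Pre_check a) := by unfold Pre_check; infer_instance
def pvWitness_check : List (List String) := [["a", "b"], ["b", "b"]]

def Spec_check (a : List (List String)) (out : Int) : Prop := out = check_alt a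
instance (a : List (List String)) (out : Int) : Decidable (Spec_check a out) := by unfold Spec_check; infer_instance

-- ===== CLAIM (what is proved, stated in full; the proofs are below) =====
def Claim_equal_check : Prop := ∀ (a : List (List String)), Dom_check a → Pre_check a → Spec_check a (check a)

-- ===== LEMMAS AND PROOFS =====

-- spec of both sides: the largest gap of the boundary list p :: c ++ [e]
def gmax : Int → List Int → Int → Int
  | p, [], e => e - p
  | p, k :: ks, e => max (k - p) (gmax k ks e)

-- last boundary before the end marker
def lastD (p : Int) : List Int → Int
  | [] => p
  | k :: ks => lastD k ks

-- the cut positions of line g on indices [0, x)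
def cutsF (g : Int → String) (x : Nat) : List Int :=
  (PySem.List.pyRange 1 (x : Int) 1).filter (fun k => decide (g k ≠ g (k - 1)))

-- the successive differences of the boundary list
def diffs : Int → List Int → Int → List Int
  | p, [], e => [e - p]
  | p, k :: ks, e => (k - p) :: diffs k ks e

lemma lastD_append (p : Int) (c : List Int) (k : Int) : lastD p (c ++ [k]) = k := by
  induction c generalizing p with
  | nil => rfl
  | cons y ys ih => simpa [lastD] using ih y

lemma gmax_bump (c : List Int) (p x : Int) :
    gmax p c (x + 1) = max (gmax p c x) (x + 1 - lastD p c) := by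
  induction c generalizing p with
  | nil => simp [gmax, lastD]
  | cons k ks ih => simp [gmax, lastD, ih k]

lemma gmax_append (c : List Int) (p k e : Int) :
    gmax p (c ++ [k]) e = max (gmax p c k) (e - k) := by
  induction c generalizing p with
  | nil => rfl
  | cons y ys ih => simp [gmax, ih y]

lemma zip_diffs (c : List Int) (p e : Int) :
    (((p :: (c ++ [e])).zip ((p :: (c ++ [e])).tail)).map (fun q => q.2 - q.1)) = diffs p c e := by
  induction c generalizing p with
  | nil => rfl
  | cons k ks ih => simpa [diffs] using ih k

lemma foldl_max_diffs (c : List Int) (p e a : Int) :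
    (diffs p c e).foldl max a = max a (gmax p c e) := by
  induction c generalizing p a with
  | nil => simp [diffs, gmax]
  | cons k ks ih => simp [diffs, gmax, List.foldl_cons, ih k]

lemma max?_diffs (c : List Int) (p e : Int) :
    (PySem.List.max? (diffs p c e) (fun y => y)).getD 0 = gmax p c e := by
  cases c with
  | nil => simp [diffs, PySem.List.max?_id_cons, gmax]
  | cons k ks =>
      simp [diffs, PySem.List.max?_id_cons, foldl_max_diffs, gmax]

lemma cutsF_succ (g : Int → String) (x : Nat) (hx : 1 ≤ x) :
    cutsF g (x + 1) =
      cutsF g x ++ (if g (x : Int) ≠ g ((x : Int) - 1) then [(x : Int)] else []) := by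
  unfold cutsF
  rw [show (((x + 1 : Nat)) : Int) = (x : Int) + 1 by push_cast; ring,
    PySem.List.pyRange_one_succ_right (by exact_mod_cast hx), List.filter_append]
  by_cases hc : g (x : Int) ≠ g ((x : Int) - 1) <;> simp [hc]

-- A's inner loop invariant: state = (length of the final run, running max folded with gmax)
lemma innerA_inv (g : Int → String) (x : Nat) (hx : 1 ≤ x) (t : Int) (ht : 1 ≤ t) :
    (PySem.List.pyRange 1 (x : Int) 1).foldl
      (fun (p : Int × Int) j =>
        let cnt : Int := if g j = g (j - 1) then p.1 + 1 else 1
        (cnt, if p.2 < cnt then cnt else p.2)) (1, t)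
    = ((x : Int) - lastD 0 (cutsF g x), max t (gmax 0 (cutsF g x) x)) := by
  induction x with
  | zero => omega
  | succ n ih =>
      by_cases hn : 1 ≤ n
      · rw [show (((n + 1 : Nat)) : Int) = (n : Int) + 1 by push_cast; ring,
          PySem.List.pyRange_one_succ_right (by exact_mod_cast hn), List.foldl_append,
          ih hn, cutsF_succ g n hn]
        have hb := gmax_bump (cutsF g n) 0 (n : Int)
        have hl := lastD_append 0 (cutsF g n) (n : Int)
        have ha := gmax_append (cutsF g n) 0 (n : Int) ((n : Int) + 1)
        by_cases hc : g (n : Int) = g ((n : Int) - 1)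
        · simp [hc]; (try split_ifs) <;> omega
        · simp [hc, hl, ha]; (try split_ifs) <;> omega
      · have hn0 : n = 0 := by omega
        subst hn0
        rw [show PySem.List.pyRange 1 (((0 + 1 : Nat)) : Int) 1 = [] from
          PySem.List.pyRange_one_eq_nil (by norm_num)]
        simp [cutsF, PySem.List.pyRange_one_eq_nil, lastD, gmax]; omega

lemma innerA_eq (g : Int → String) (x : Nat) (hx : 1 ≤ x) (t : Int) (ht : 1 ≤ t) :
    innerLoopA g x t = max t (gmax 0 (cutsF g x) x) := by
  unfold innerLoopA
  rw [innerA_inv g x hx t ht]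

lemma maxRunB_map (g : Int → String) (x : Nat) (hx : 1 ≤ x) :
    maxRunB ((PySem.List.pyRange 0 (x : Int) 1).map g) = gmax 0 (cutsF g x) (x : Int) := by
  unfold maxRunB
  have hlen : ((PySem.List.pyRange 0 (x : Int) 1).map g).length = x := by
    simp [PySem.List.length_pyRange_one]
  rw [hlen]
  have hx0 : ¬ (x = 0) := by omega
  simp only [hx0, if_false]
  have hcuts : (PySem.List.pyRange 1 (x : Int) 1).filter
      (fun k => decide (PySem.List.pyGetD ((PySem.List.pyRange 0 (x : Int) 1).map g) k "" ≠
                        PySem.List.pyGetD ((PySem.List.pyRange 0 (x : Int) 1).map g) (k - 1) ""))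
      = cutsF g x := by
    unfold cutsF
    apply List.filter_congr
    intro k hk
    have hk' := PySem.List.mem_pyRange_one.mp hk
    rw [PySem.List.pyGetD_map_pyRange_of_nonneg g (x : Int) k "" (by omega) (by omega),
        PySem.List.pyGetD_map_pyRange_of_nonneg g (x : Int) (k - 1) "" (by omega) (by omega)]
  rw [hcuts, zip_diffs (cutsF g x) 0 (x : Int), max?_diffs]

-- fold two different step functions to the same result under an invariant on the accumulator
lemma foldl_congr_inv {α β : Type} (P : β → Prop) (f g : β → α → β) (l : List α) :
    ∀ b, P b → (∀ b' x, P b' → x ∈ l → f b' x = g b' x ∧ P (g b' x)) →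
      l.foldl f b = l.foldl g b := by
  induction l with
  | nil => intro b _ _; rfl
  | cons y ys ih =>
      intro b hb hstep
      have h := hstep b y hb (by simp)
      simp only [List.foldl_cons, h.1]
      exact ih (g b y) h.2 (fun b' x hb' hx => hstep b' x hb' (by simp [hx]))

-- ===== VERDICT (by name: the statement is the Claim_ definition above) =====
theorem check_spec : Claim_equal_check := by
  intro a _ _
  unfold Spec_check check check_alt
  apply foldl_congr_inv (fun t => 1 ≤ t)
  · norm_num
  · intro t i ht hi
    have hi' := PySem.List.mem_pyRange_one.mp hi
    have hx : 1 ≤ a.length := by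
      by_contra h
      have : a.length = 0 := by omega
      simp [this] at hi'
      omega
    set grow := fun j => PySem.List.pyGetD (PySem.List.pyGetD a i []) j ""
    set gcol := fun j => PySem.List.pyGetD (PySem.List.pyGetD a j []) i ""
    have h1 := innerA_eq grow a.length hx t ht
    have h2 := innerA_eq gcol a.length hx (max t (gmax 0 (cutsF grow a.length) a.length))
      (by omega)
    constructor
    · simp only [h1, h2, maxRunB_map grow a.length hx, maxRunB_map gcol a.length hx]
    · dsimp only
      omega
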